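-- pv_equiv track=rewrite | github.com/zlaiet/car_pricing | src/preprocessing.py | models_rand
-- ===== SOURCE A (Python) =====
-- def models_rand(rand):
--     if ("ROVER" or "LAND") in rand:
--         model = rand.rsplit(" ", len(rand))[1 : len(rand)]
--         m_ = ""
--         for mod in model:
--             m_ = m_ + mod + " "
--         return m_
--     else:
--         return rand
-- ===== SOURCE B (Python) =====
-- def models_rand(rand):
--     # Same guard as A: ("ROVER" or "LAND") evaluates to "ROVER", so A only tests "ROVER".
--     if "ROVER" in rand:
--         _, sep, rest = rand.partition(" ")
--         return rest + " " if sep else ""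
--     return rand
-- ===== Notes on version B (the rewrite author's own statement) =====
-- stated objective: simpler
-- what changed: Replaced A's rsplit-into-a-word-list plus a concatenating loop by a single partition at the first space: return everything after it plus a trailing space (or "" if no space), keeping A's guard where ("ROVER" or "LAND") evaluates to just "ROVER".
import Mathlib
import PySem

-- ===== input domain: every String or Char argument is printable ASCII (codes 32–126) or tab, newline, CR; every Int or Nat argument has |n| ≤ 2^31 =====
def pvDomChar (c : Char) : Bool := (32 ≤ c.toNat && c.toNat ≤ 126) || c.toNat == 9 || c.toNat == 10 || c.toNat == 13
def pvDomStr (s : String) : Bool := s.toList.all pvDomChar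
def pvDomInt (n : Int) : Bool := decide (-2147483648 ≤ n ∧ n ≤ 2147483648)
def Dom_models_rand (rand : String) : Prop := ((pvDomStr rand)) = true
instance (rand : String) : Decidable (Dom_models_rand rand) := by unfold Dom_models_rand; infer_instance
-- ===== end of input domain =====

-- B replaces A's rsplit-into-a-word-list plus concatenating loop by a single partition at the
-- first space (objective: simpler); the guard is unchanged (Python's ("ROVER" or "LAND") is "ROVER").

-- ===== PORT A =====

-- s.split(c) for a single-character separator c (left-to-right split on every occurrence).
def splitc (c : Char) : List Char → List (List Char)
  | [] => [[]]
  | a :: t =>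
    match splitc c t with
    | [] => [[a]]   -- unreachable: splitc never returns []
    | h :: r => if a = c then [] :: h :: r else (a :: h) :: r

-- sep.join(parts) for the single-character separator.
def joinsp (c : Char) : List (List Char) → List Char
  | [] => []
  | [p] => p
  | p :: ps => p ++ c :: joinsp c ps

-- Hand port of rand.rsplit(" ", m) (PySem has no rsplit): exact for the single-character
-- separator " " — at most m splits, counted from the right; the un-split left part stays joined.
def rsplitSpace (l : List Char) (m : Int) : List (List Char) :=
  let parts := splitc ' ' l
  if m < 0 ∨ parts.length - 1 ≤ m.toNat then parts
  else [joinsp ' ' (parts.take (parts.length - m.toNat))] ++ parts.drop (parts.length - m.toNat)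

-- Python's ("ROVER" or "LAND") evaluates to "ROVER", so the guard only tests "ROVER".
def models_rand (rand : String) : String :=
  if PySem.Str.isIn "ROVER" rand then
    let model := PySem.List.slice (rsplitSpace rand.toList (PySem.Str.len rand))
                   (some 1) (some (PySem.Str.len rand))
    let m_ := model.foldl (fun m_ mod => m_ ++ mod ++ [' ']) []
    String.ofList m_
  else rand

-- ===== PORT B =====

-- Hand port of rand.partition(" ") (PySem has no partition): the first occurrence of " "
-- (found with str.find semantics) splits the string; only sep-nonempty and the tail are used.
def models_rand_alt (rand : String) : String :=
  if PySem.Str.isIn "ROVER" rand then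
    let i := PySem.Chars.find rand.toList [' ']
    if i = -1 then ""   -- no separator: partition's sep is "", return ""
    else String.ofList (rand.toList.drop (i.toNat + 1) ++ [' '])
  else rand

-- ===== PRECONDITION & SPEC =====
def Spec_models_rand (rand : String) (out : String) : Prop := out = models_rand_alt rand
instance (rand : String) (out : String) : Decidable (Spec_models_rand rand out) := by unfold Spec_models_rand; infer_instance

-- ===== CLAIM (what is proved, stated in full; the proofs are below) =====
def Claim_equal_models_rand : Prop := ∀ (rand : String), Dom_models_rand rand → Spec_models_rand rand (models_rand rand)

-- ===== LEMMAS AND PROOFS =====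

theorem splitc_ne_nil (c : Char) (l : List Char) : splitc c l ≠ [] := by
  cases l with
  | nil => simp [splitc]
  | cons a t =>
    simp only [splitc]
    cases h : splitc c t with
    | nil => simp
    | cons h r => by_cases hac : a = c <;> simp [hac]

theorem length_splitc (c : Char) (l : List Char) :
    (splitc c l).length = l.count c + 1 := by
  induction l with
  | nil => simp [splitc]
  | cons a t ih =>
    simp only [splitc]
    cases h : splitc c t with
    | nil => exact absurd h (splitc_ne_nil c t)
    | cons hd r =>
      rw [h] at ih
      simp only [List.length_cons] at ih
      by_cases hac : a = c
      · subst hac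
        simp only [if_pos rfl, List.length_cons, List.count_cons]
        simp
        omega
      · simp only [if_neg hac, List.length_cons, List.count_cons]
        simp [beq_iff_eq, hac, Ne.symm hac]
        omega

theorem joinsp_splitc (c : Char) (l : List Char) : joinsp c (splitc c l) = l := by
  induction l with
  | nil => simp [splitc, joinsp]
  | cons a t ih =>
    simp only [splitc]
    cases h : splitc c t with
    | nil => exact absurd h (splitc_ne_nil c t)
    | cons hd r =>
      rw [h] at ih
      by_cases hac : a = c
      · subst hac
        simp only [if_pos rfl, joinsp]
        cases r <;> simpa [joinsp] using ih
      · simp only [if_neg hac]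
        cases r <;> simpa [joinsp] using ih

theorem foldl_joinsp (c : Char) (ps : List (List Char)) (hps : ps ≠ []) (acc : List Char) :
    ps.foldl (fun m p => m ++ p ++ [c]) acc = acc ++ joinsp c ps ++ [c] := by
  induction ps generalizing acc with
  | nil => exact absurd rfl hps
  | cons p ps ih =>
    cases ps with
    | nil => simp [joinsp]
    | cons q qs =>
      rw [List.foldl_cons, ih (by simp)]
      simp [joinsp]

-- str.find for a single-character needle, related to idxOf.
theorem find_go_singleton (c : Char) (l : List Char) (k : Nat) :
    PySem.Chars.find.go [c] l k = if c ∈ l then ((k : Int) + l.idxOf c) else -1 := by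
  induction l generalizing k with
  | nil => simp [PySem.Chars.find.go]
  | cons a t ih =>
    by_cases hac : c = a
    · subst hac
      simp [PySem.Chars.find.go, List.isPrefixOf, List.idxOf_cons]
    · have : ¬ [c].isPrefixOf (a :: t) = true := by
        simp [List.isPrefixOf]
        intro h; exact hac h
      rw [PySem.Chars.find.go]
      simp only [this, if_false, ih]
      by_cases hm : c ∈ t
      · have : c ∈ a :: t := List.mem_cons_of_mem a hm
        simp [hm, this, List.idxOf_cons, Ne.symm hac]
        push_cast
        ring
      · have : c ∉ a :: t := by
          simp only [List.mem_cons, not_or]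
          exact ⟨hac, hm⟩
        simp [hm, this]

theorem find_singleton (c : Char) (l : List Char) :
    PySem.Chars.find l [c] = if c ∈ l then (l.idxOf c : Int) else -1 := by
  rw [PySem.Chars.find, find_go_singleton]
  simp

-- the KEY lemma: A's join-with-trailing-spaces of all words but the first
-- equals the tail after the first space, plus one trailing space.
theorem key_foldl (c : Char) (l : List Char) :
    ((splitc c l).drop 1).foldl (fun m p => m ++ p ++ [c]) []
      = if c ∈ l then l.drop (l.idxOf c + 1) ++ [c] else [] := by
  induction l with
  | nil => simp [splitc]
  | cons a t ih =>
    simp only [splitc]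
    cases h : splitc c t with
    | nil => exact absurd h (splitc_ne_nil c t)
    | cons hd r =>
      by_cases hac : a = c
      · simp only [if_pos hac, List.drop_succ_cons, List.drop_zero]
        rw [foldl_joinsp c (hd :: r) (by simp) []]
        have hj := joinsp_splitc c t
        rw [h] at hj
        simp [hj, hac, List.idxOf_cons]
      · simp only [if_neg hac, List.drop_succ_cons, List.drop_zero]
        rw [h] at ih
        simp only [List.drop_succ_cons, List.drop_zero] at ih
        rw [ih]
        by_cases hm : c ∈ t
        · have hmem : c ∈ a :: t := List.mem_cons_of_mem a hm
          have hca : ¬ c = a := fun h => hac h.symm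
          simp [hm, hmem, List.idxOf_cons, beq_iff_eq, hac, hca]
        · have : c ∉ a :: t := by
            simp only [List.mem_cons, not_or]
            exact ⟨fun h => hac h.symm, hm⟩
          simp [hm, this]

theorem rsplitSpace_len (l : List Char) (m : Int) (hm : (l.count ' ' : Int) ≤ m) :
    rsplitSpace l m = splitc ' ' l := by
  unfold rsplitSpace
  have h0 : ¬ m < 0 := by omega
  have : (splitc ' ' l).length - 1 ≤ m.toNat := by
    rw [length_splitc]; omega
  simp [h0, this]

theorem models_rand_spec_aux : ∀ (rand : String), models_rand rand = models_rand_alt rand := by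
  intro rand
  unfold models_rand models_rand_alt
  by_cases hg : PySem.Str.isIn "ROVER" rand = true
  · simp only [hg, if_true]
    set s := rand.toList with hs
    -- "ROVER" occurs in s, so 'R' ∈ s, so the space count is < length
    have hinf : ("ROVER".toList) <:+: s := by
      have := (PySem.Chars.isIn_iff_infix (sub := "ROVER".toList) (s := s)).1 (by
        simpa [PySem.Str.isIn, hs] using hg)
      exact this
    have hR : 'R' ∈ s := hinf.mem (by simp)
    have hcount : s.count ' ' < s.length := by
      have := List.count_le_length (l := s) (a := ' ')
      rcases lt_or_eq_of_le this with h | h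
      · exact h
      · -- count = length would force every char to be ' ', contradicting 'R' ∈ s
        exfalso
        have hall : ∀ x ∈ s, ' ' = x := List.count_eq_length.mp h
        have := hall 'R' hR
        simp at this
    have hlen : PySem.Str.len rand = (s.length : Int) := by
      simp [PySem.Str.len, hs]
    rw [hlen, rsplitSpace_len s _ (by exact_mod_cast Nat.le_of_lt hcount)]
    -- the slice [1 : len] is just drop 1 (len ≥ number of pieces)
    have hslice : PySem.List.slice (splitc ' ' s) (some 1) (some (s.length : Int))
        = (splitc ' ' s).drop 1 := by
      have h1 := PySem.List.slice_natCast (splitc ' ' s) 1 s.length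
      rw [show ((1 : Nat) : Int) = (1 : Int) from rfl] at h1
      rw [h1]
      apply List.take_of_length_le
      rw [List.length_drop, length_splitc]; omega
    rw [hslice, key_foldl, find_singleton]
    by_cases hsp : ' ' ∈ s
    · have h0 : (0 : Int) ≤ (s.idxOf ' ' : Int) := Int.natCast_nonneg _
      have hidx : (s.idxOf ' ' : Int) ≠ -1 := by omega
      simp [hsp, hidx]
    · simp [hsp]
  · rw [if_neg hg, if_neg hg]

-- ===== VERDICT (by name: the statement is the Claim_ definition above) =====
theorem models_rand_spec : Claim_equal_models_rand := by
  intro rand _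
  unfold Spec_models_rand
  exact models_rand_spec_aux rand
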